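-- pv_equiv track=rewrite | github.com/pypi-data/pypi-mirror-400 | packages/avl-axi/avl_axi-0.4.0-py3-none-any.whl/avl_axi/_utils.py | get_burst_addresses
-- ===== SOURCE A (Python) =====
-- def get_burst_addresses(base, length, size, burst):
--     """
--     Calculate addresses for an AXI transaction.
--
--     Args:
--         base (int): Starting address (ARADDR/AWADDR)
--         length (int): ARLEN/AWLEN - number of transfers minus 1 (0-255)
--         size (int): ARSIZE/AWSIZE - size of each transfer as power of 2
--                    0=1 byte, 1=2 bytes, 2=4 bytes, 3=8 bytes, etc.
--         burst (int): ARBURST/AWBURST - burst type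
--                     0=FIXED, 1=INCR, 2=WRAP
--
--     Returns:
--         list: List of addresses for all transfers in the transaction
--     """
--     addresses = []
--     num_transfers = length + 1  # ARLEN/AWLEN is number of transfers - 1
--     transfer_size = 2 ** size   # Convert size encoding to actual bytes
--
--     if burst == 0:  # FIXED burst
--         # All transfers use the same address
--         addresses = [base] * num_transfers
--
--     elif burst == 1:  # INCR (incrementing) burst
--         # Each transfer increments by transfer_size
--         for i in range(num_transfers):
--             addresses.append(base + (i * transfer_size))
--
--     elif burst == 2:  # WRAP burst
--         # Calculate wrap boundary
--         wrap_boundary = transfer_size * num_transfers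
--
--         # Align the base address to the wrap boundary
--         aligned_base = (base // wrap_boundary) * wrap_boundary
--
--         for i in range(num_transfers):
--             addr = base + (i * transfer_size)
--             # Wrap around within the boundary
--             wrapped_addr = aligned_base + ((addr - aligned_base) % wrap_boundary)
--             addresses.append(wrapped_addr)
--
--     else:
--         raise ValueError(f"Invalid burst type: {burst}. Must be 0 (FIXED), 1 (INCR), or 2 (WRAP)")
--
--     return addresses
-- ===== SOURCE B (Python) =====
-- def get_burst_addresses(base, length, size, burst):
--     n = length + 1
--     step = 2 ** size
--     if burst == 0:  # FIXED: repeated base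
--         return [base] * n
--     if burst == 1:  # INCR: running-address walk
--         out = []
--         addr = base
--         for _ in range(n):
--             out.append(addr)
--             addr += step
--         return out
--     if burst == 2:  # WRAP: stateful boundary-reset walk
--         boundary = step * n
--         lower = (base // boundary) * boundary
--         upper = lower + boundary
--         out = []
--         addr = base
--         for _ in range(n):
--             out.append(addr)
--             addr += step
--             if addr >= upper:
--                 addr -= boundary
--         return out
--     raise ValueError(f"Invalid burst type: {burst}. Must be 0 (FIXED), 1 (INCR), or 2 (WRAP)")
-- ===== Notes on version B (the rewrite author's own statement) =====
-- stated objective: idiomatic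
-- what changed: INCR and WRAP are computed by a stateful running-address walk (addr += step, with a subtract-boundary reset at the wrap upper bound) instead of A's per-element index*size closed form with an explicit modulo per WRAP element.
-- outside the precondition, e.g. on get_burst_addresses(5, 1, -1, 1): A returns [5.0, 5.5], B returns [5.0, 5.5]
import Mathlib
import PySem

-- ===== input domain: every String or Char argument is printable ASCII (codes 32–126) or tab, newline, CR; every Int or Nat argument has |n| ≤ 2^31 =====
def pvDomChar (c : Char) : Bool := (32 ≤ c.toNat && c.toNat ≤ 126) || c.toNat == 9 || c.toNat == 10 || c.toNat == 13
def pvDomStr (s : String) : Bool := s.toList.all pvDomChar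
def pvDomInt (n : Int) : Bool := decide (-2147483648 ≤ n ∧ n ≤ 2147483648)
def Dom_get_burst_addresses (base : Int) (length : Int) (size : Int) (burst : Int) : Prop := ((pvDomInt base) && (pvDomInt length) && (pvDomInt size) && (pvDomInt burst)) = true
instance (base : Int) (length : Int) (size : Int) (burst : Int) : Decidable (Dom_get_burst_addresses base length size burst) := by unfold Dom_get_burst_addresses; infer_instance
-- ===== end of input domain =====

-- B replaces A's per-element index*size closed form (with an explicit modulo for WRAP)
-- by a stateful running-address walk with a boundary reset (objective: idiomatic).

-- ===== PORT A =====
-- Literal port of A. '2 ** size' is ported as '2 ^ size.toNat': exact for 0 ≤ size, which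
-- Pre_ guarantees whenever the value is used (for burst = 0 it is computed but unused).
def get_burst_addresses (base : Int) (length : Int) (size : Int) (burst : Int) : List Int :=
  let num_transfers := length + 1
  let transfer_size : Int := 2 ^ size.toNat
  if burst = 0 then
    List.replicate num_transfers.toNat base
  else if burst = 1 then
    (PySem.List.pyRange 0 num_transfers 1).foldl
      (fun acc i => acc ++ [base + i * transfer_size]) []
  else if burst = 2 then
    let wrap_boundary := transfer_size * num_transfers
    let aligned_base := PySem.Int.floordiv base wrap_boundary * wrap_boundary
    (PySem.List.pyRange 0 num_transfers 1).foldl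
      (fun acc i => acc ++ [aligned_base + PySem.Int.mod (base + i * transfer_size - aligned_base) wrap_boundary]) []
  else []  -- Python raises ValueError here; excluded by Pre_

-- ===== PORT B =====
-- running-address walk: emit addr, then addr += step
def pvWalkIncr (addr step : Int) : Nat → List Int
  | 0 => []
  | n + 1 => addr :: pvWalkIncr (addr + step) step n

-- wrap walk: emit addr, addr += step, subtract boundary when addr ≥ upper
def pvWalkWrap (addr step upper boundary : Int) : Nat → List Int
  | 0 => []
  | n + 1 =>
    addr ::
      (let a := addr + step
       pvWalkWrap (if upper ≤ a then a - boundary else a) step upper boundary n)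

def get_burst_addresses_alt (base : Int) (length : Int) (size : Int) (burst : Int) : List Int :=
  let n := length + 1
  let step : Int := 2 ^ size.toNat
  if burst = 0 then
    List.replicate n.toNat base
  else if burst = 1 then
    pvWalkIncr base step n.toNat
  else if burst = 2 then
    let boundary := step * n
    let lower := PySem.Int.floordiv base boundary * boundary
    pvWalkWrap base step (lower + boundary) boundary n.toNat
  else []

-- ===== PRECONDITION & SPEC =====
-- Pre_ excludes: burst ∉ {0,1,2} (A raises ValueError); burst = 2 with length = -1 (A raises
-- ZeroDivisionError); and size < 0 for burst ∈ {1,2}, where Python's 2**size is a float and A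
-- returns a list of floats rather than ints.
def Pre_get_burst_addresses (base : Int) (length : Int) (size : Int) (burst : Int) : Prop :=
  (burst = 0 ∨ burst = 1 ∨ burst = 2) ∧ (burst ≠ 0 → 0 ≤ size) ∧ (burst = 2 → length + 1 ≠ 0)
instance (base : Int) (length : Int) (size : Int) (burst : Int) : Decidable (Pre_get_burst_addresses base length size burst) := by unfold Pre_get_burst_addresses; infer_instance

def pvWitness_get_burst_addresses : Int × Int × Int × Int := (19, 3, 2, 2)

def Spec_get_burst_addresses (base : Int) (length : Int) (size : Int) (burst : Int) (out : List Int) : Prop := out = get_burst_addresses_alt base length size burst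
instance (base : Int) (length : Int) (size : Int) (burst : Int) (out : List Int) : Decidable (Spec_get_burst_addresses base length size burst out) := by unfold Spec_get_burst_addresses; infer_instance

-- ===== CLAIM (what is proved, stated in full; the proofs are below) =====
def Claim_equal_get_burst_addresses : Prop := ∀ (base : Int) (length : Int) (size : Int) (burst : Int), Dom_get_burst_addresses base length size burst → Pre_get_burst_addresses base length size burst → Spec_get_burst_addresses base length size burst (get_burst_addresses base length size burst)

-- ===== LEMMAS AND PROOFS =====

-- the INCR walk is the closed form A computes
theorem pvWalkIncr_eq (step : Int) : ∀ (k : Nat) (addr : Int),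
    pvWalkIncr addr step k = List.map (fun i : Nat => addr + (i : Int) * step) (List.range k) := by
  intro k
  induction k with
  | zero => intro addr; rfl
  | succ n ih =>
    intro addr
    rw [List.range_succ_eq_map, List.map_cons, List.map_map]
    show addr :: pvWalkIncr (addr + step) step n = _
    rw [ih]
    congr 1
    · simp
    · apply List.map_congr_left
      intro i _
      simp only [Function.comp_apply]
      push_cast
      ring

-- the WRAP walk is A's modulo closed form, under the walk invariant lower ≤ addr < lower + boundary
theorem pvWalkWrap_eq (step boundary lower : Int) (hstep : 0 < step) (hsb : step ≤ boundary) :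
    ∀ (k : Nat) (addr : Int), lower ≤ addr → addr < lower + boundary →
    pvWalkWrap addr step (lower + boundary) boundary k
      = List.map (fun i : Nat => lower + (addr - lower + (i : Int) * step) % boundary) (List.range k) := by
  intro k
  induction k with
  | zero => intro addr _ _; rfl
  | succ n ih =>
    intro addr h1 h2
    have hb : 0 < boundary := lt_of_lt_of_le hstep hsb
    rw [List.range_succ_eq_map, List.map_cons, List.map_map]
    show addr :: pvWalkWrap (if lower + boundary ≤ addr + step then addr + step - boundary else addr + step)
        step (lower + boundary) boundary n = _
    set a' : Int := if lower + boundary ≤ addr + step then addr + step - boundary else addr + step with ha'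
    have hlo : lower ≤ a' := by rw [ha']; split_ifs <;> omega
    have hhi : a' < lower + boundary := by rw [ha']; split_ifs <;> omega
    rw [ih a' hlo hhi]
    congr 1
    · have h3 : (addr - lower) % boundary = addr - lower :=
        Int.emod_eq_of_lt (by omega) (by omega)
      simp [h3]
    · apply List.map_congr_left
      intro i _
      simp only [Function.comp_apply]
      push_cast
      congr 1
      rw [ha']; split_ifs with h
      · have heq : addr + step - boundary - lower + (i : Int) * step
            = (addr - lower + ((i : Int) + 1) * step) - boundary := by ring
        rw [heq, Int.sub_emod_right]
      · congr 1; ring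

-- ===== VERDICT (by name: the statement is the Claim_ definition above) =====
theorem get_burst_addresses_spec : Claim_equal_get_burst_addresses := by
  intro base length size burst _ hpre
  obtain ⟨hb, _, hwz⟩ := hpre
  unfold Spec_get_burst_addresses get_burst_addresses get_burst_addresses_alt
  rcases hb with h0 | h1 | h2
  · subst h0; simp
  · -- INCR
    subst h1
    simp only [show ((1:Int) = 0) = False by simp, if_true, if_false]
    rw [PySem.List.foldl_append_singleton_eq_map,
        PySem.List.pyRange_one 0 (length + 1), List.map_map, pvWalkIncr_eq,
        Int.sub_zero]
    apply List.map_congr_left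
    intro i _
    simp only [Function.comp_apply]
    ring
  · -- WRAP
    subst h2
    simp only [show ((2:Int) = 0) = False by simp, show ((2:Int) = 1) = False by simp,
      if_true, if_false]
    set n := length + 1 with hn
    set ts : Int := 2 ^ size.toNat with hts
    have hts0 : 0 < ts := by positivity
    by_cases hneg : n ≤ 0
    · -- n < 0 (n = 0 is excluded by Pre_): both loops are empty
      have hn0 : n.toNat = 0 := by omega
      rw [PySem.List.pyRange_one_eq_nil (by omega), hn0]
      rfl
    · have hpos : 0 < n := by omega
      have hb0 : 0 < ts * n := by positivity
      have hsb : ts ≤ ts * n := le_mul_of_one_le_right (le_of_lt hts0) (by omega)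
      set wb := ts * n with hwb
      set ab := PySem.Int.floordiv base wb * wb with hab
      have hfd : PySem.Int.floordiv base wb = base / wb :=
        PySem.Int.floordiv_eq_ediv_of_pos hb0
      have hdm : wb * (base / wb) + base % wb = base := Int.mul_ediv_add_emod base wb
      have hml : base % wb < wb := Int.emod_lt_of_pos base hb0
      have hmn : 0 ≤ base % wb := Int.emod_nonneg base (by omega)
      have hcomm : base / wb * wb = wb * (base / wb) := by ring
      have hlo : ab ≤ base := by rw [hab, hfd]; omega
      have hhi : base < ab + wb := by rw [hab, hfd]; omega
      rw [PySem.List.foldl_append_singleton_eq_map,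
          PySem.List.pyRange_one 0 n, List.map_map,
          pvWalkWrap_eq ts wb ab hts0 hsb n.toNat base hlo hhi,
          Int.sub_zero]
      apply List.map_congr_left
      intro i _
      simp only [Function.comp_apply]
      rw [PySem.Int.mod_eq_emod_of_pos hb0]
      congr 2
      ring
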